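-- pv_equiv track=rewrite | github.com/bjmcelroy-44/SteakMatch | server_engine.py | prioritize_groups
-- ===== SOURCE A (Python) =====
-- def prioritize_groups(groups: list[str], priority_groups: list[str]) -> list[str]:
--     ordered: list[str] = []
--     for group in priority_groups:
--         if group in groups and group not in ordered:
--             ordered.append(group)
--     for group in groups:
--         if group not in ordered:
--             ordered.append(group)
--     return ordered
-- ===== SOURCE B (Python) =====
-- def prioritize_groups(groups: list[str], priority_groups: list[str]) -> list[str]:
--     unique = list(dict.fromkeys(groups))
--     rank: dict[str, int] = {}
--     for i, g in enumerate(priority_groups):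
--         rank.setdefault(g, i)
--     n = len(priority_groups)
--     return sorted(unique, key=lambda g: rank.get(g, n))
-- ===== Notes on version B (the rewrite author's own statement) =====
-- stated objective: faster
-- what changed: Replaces A's two filtered append-scans (a membership test against the growing output list on every step) by the idiomatic dict.fromkeys dedup, a first-index rank table built once from priority_groups, and a single stable sort of the deduped groups by rank with len(priority_groups) as the default key.
import Mathlib
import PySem

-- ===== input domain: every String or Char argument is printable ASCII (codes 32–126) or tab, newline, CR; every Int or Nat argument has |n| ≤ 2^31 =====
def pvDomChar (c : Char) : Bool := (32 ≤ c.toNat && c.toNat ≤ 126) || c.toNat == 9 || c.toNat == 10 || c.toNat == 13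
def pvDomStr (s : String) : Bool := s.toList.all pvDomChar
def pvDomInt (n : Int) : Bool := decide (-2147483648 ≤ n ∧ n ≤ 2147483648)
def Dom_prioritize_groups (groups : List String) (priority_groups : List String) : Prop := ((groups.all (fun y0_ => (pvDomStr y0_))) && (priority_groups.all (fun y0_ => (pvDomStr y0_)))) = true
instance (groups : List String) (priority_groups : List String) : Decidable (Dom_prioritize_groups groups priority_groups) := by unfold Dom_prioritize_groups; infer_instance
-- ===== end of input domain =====

-- B replaces A's two filtered append-scans by a dedup, a first-index rank table and one stable sort by rank (idiomatic restructuring, same observable result).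


-- ===== PORT A =====
def prioritize_groups (groups : List String) (priority_groups : List String) : List String :=
  let ordered : List String := []
  let ordered := priority_groups.foldl
    (fun ordered group =>
      if groups.contains group && !(ordered.contains group) then ordered ++ [group] else ordered)
    ordered
  groups.foldl
    (fun ordered group =>
      if !(ordered.contains group) then ordered ++ [group] else ordered)
    ordered

-- ===== PORT B =====
def prioritize_groups_alt (groups : List String) (priority_groups : List String) : List String :=
  let unique := PySem.List.dedup groups
  let rank := (PySem.List.enumerate priority_groups 0).foldl
    (fun rank ig => PySem.Dict.setdefault rank ig.2 ig.1)
    (PySem.Dict.empty : PySem.Dict String Int)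
  let n : Int := (priority_groups.length : Int)
  PySem.List.sorted unique (fun g => rank.getD g n)

-- ===== PRECONDITION & SPEC =====
def Spec_prioritize_groups (groups : List String) (priority_groups : List String) (out : List String) : Prop := out = prioritize_groups_alt groups priority_groups
instance (groups : List String) (priority_groups : List String) (out : List String) : Decidable (Spec_prioritize_groups groups priority_groups out) := by unfold Spec_prioritize_groups; infer_instance

-- ===== CLAIM (what is proved, stated in full; the proofs are below) =====
def Claim_equal_prioritize_groups : Prop := ∀ (groups : List String) (priority_groups : List String), Dom_prioritize_groups groups priority_groups → Spec_prioritize_groups groups priority_groups (prioritize_groups groups priority_groups)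

-- ===== LEMMAS AND PROOFS =====

-- first index of g in a list (as Python's list.index would find it), none if absent
def fidx? (g : String) : List String → Option Nat
  | [] => none
  | x :: t => if x == g then some 0 else (fidx? g t).map (· + 1)

-- the sort key B uses, in closed form
def keyFn (priority : List String) (g : String) : Int :=
  match fidx? g priority with
  | some k => (k : Int)
  | none => (priority.length : Int)

theorem fidx?_eq_none_iff (g : String) (l : List String) : fidx? g l = none ↔ g ∉ l := by
  induction l with
  | nil => simp [fidx?]
  | cons x t ih =>
    by_cases h : x = g
    · simp [fidx?, h]
    · simp [fidx?, h, ih]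
      exact fun _ hgx => h hgx.symm


theorem fidx?_lt_length (g : String) (l : List String) (k : Nat) (h : fidx? g l = some k) :
    k < l.length := by
  induction l generalizing k with
  | nil => simp [fidx?] at h
  | cons x t ih =>
    by_cases hx : x = g
    · simp [fidx?, hx] at h
      subst h; simp
    · simp [fidx?, hx] at h
      obtain ⟨j, hj, rfl⟩ := h
      have := ih j hj
      simp
      omega

-- running Set.add from any accumulator: the accumulator, then the fresh part of dedup
theorem ofList_acc (l : List String) : ∀ (s : List String),
    l.foldl PySem.Set.add s = s ++ (PySem.List.dedup l).filter (fun x => !s.contains x) := by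
  induction l with
  | nil =>
    intro s
    simp [PySem.List.dedup, PySem.Set.ofList, PySem.Set.empty]
  | cons x t ih =>
    intro s
    have hd : PySem.List.dedup (x :: t)
        = [x] ++ (PySem.List.dedup t).filter (fun y => !([x] : List String).contains y) := by
      show (x :: t).foldl PySem.Set.add PySem.Set.empty = _
      simp only [List.foldl_cons]
      have : PySem.Set.add PySem.Set.empty x = [x] := by
        simp [PySem.Set.add, PySem.Set.empty]
      rw [this, ih [x]]
    simp only [List.foldl_cons]
    rw [ih (PySem.Set.add s x), hd]
    by_cases hb : x ∈ s
    · have ha : PySem.Set.add s x = s := by simp [PySem.Set.add, List.contains_eq_mem, hb]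
      rw [ha]
      simp only [List.filter_append, List.filter_filter]
      have hx : (!s.contains x) = false := by simp [List.contains_eq_mem, hb]
      simp only [List.filter_cons, List.filter_nil, hx]
      simp only [Bool.false_eq_true, if_false, List.nil_append]
      congr 1
      apply List.filter_congr
      intro y _
      by_cases hyx : y = x
      · subst hyx; simp [hb]
      · simp [List.contains_eq_mem, fun h => hyx (h : y = x)]
    · have ha : PySem.Set.add s x = s ++ [x] := by simp [PySem.Set.add, List.contains_eq_mem, hb]
      rw [ha]
      simp only [List.filter_append, List.filter_filter, List.filter_cons, List.filter_nil]
      have hx : (!s.contains x) = true := by simp [List.contains_eq_mem, hb]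
      simp only [hx, List.append_assoc, if_true]
      congr 2
      apply List.filter_congr
      intro y _
      by_cases hyx : y = x
      · subst hyx; simp
      · simp [List.contains_eq_mem, hyx]

theorem dedup_cons (x : String) (t : List String) :
    PySem.List.dedup (x :: t) = x :: (PySem.List.dedup t).filter (fun y => !(x == y)) := by
  show (x :: t).foldl PySem.Set.add PySem.Set.empty = _
  simp only [List.foldl_cons]
  have : PySem.Set.add PySem.Set.empty x = [x] := by simp [PySem.Set.add, PySem.Set.empty]
  rw [this, ofList_acc t [x]]
  simp only [List.singleton_append, List.cons.injEq, true_and]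
  apply List.filter_congr
  intro y _
  simp only [List.contains_eq_mem, List.mem_singleton]
  by_cases h : y = x
  · subst h; simp
  · simp [h, Ne.symm h]

theorem dedup_filter (q : String → Bool) (l : List String) :
    PySem.List.dedup (l.filter q) = (PySem.List.dedup l).filter q := by
  induction l with
  | nil => rfl
  | cons x t ih =>
    by_cases hq : q x
    · rw [List.filter_cons_of_pos hq, dedup_cons, dedup_cons, ih]
      simp only [List.filter_cons_of_pos hq, List.filter_filter, List.cons.injEq, true_and]
      apply List.filter_congr
      intro y _
      exact Bool.and_comm _ _
    · rw [List.filter_cons_of_neg hq, dedup_cons, ih]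
      rw [List.filter_cons_of_neg hq, List.filter_filter]
      apply List.filter_congr
      intro y _
      by_cases hyx : y = x
      · subst hyx; simp [hq]
      · simp [Ne.symm hyx]

-- A's first loop: append each element passing p that is not yet in the accumulator
theorem loopA (p : String → Bool) (l : List String) : ∀ (acc : List String),
    l.foldl (fun acc g => if p g && !(acc.contains g) then acc ++ [g] else acc) acc
      = acc ++ (PySem.List.dedup (l.filter p)).filter (fun g => !acc.contains g) := by
  induction l with
  | nil => intro acc; simp [PySem.List.dedup, PySem.Set.ofList, PySem.Set.empty]
  | cons x t ih =>
    intro acc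
    simp only [List.foldl_cons]
    by_cases hp : p x
    · rw [List.filter_cons_of_pos hp, dedup_cons]
      by_cases hm : x ∈ acc
      · have hc : (p x && !(acc.contains x)) = false := by
          simp [List.contains_eq_mem, hm]
        rw [hc]
        simp only [Bool.false_eq_true, if_false]
        rw [ih acc]
        congr 1
        simp only [List.filter_cons, List.filter_filter]
        have : (!acc.contains x) = false := by simp [List.contains_eq_mem, hm]
        simp only [this, Bool.false_eq_true, if_false]
        apply List.filter_congr
        intro y _
        by_cases hyx : y = x
        · subst hyx; simp [List.contains_eq_mem, hm]
        · by_cases hy : y ∈ acc <;>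
            simp [List.contains_eq_mem, hy, hyx, Ne.symm hyx]
      · have hc : (p x && !(acc.contains x)) = true := by
          simp [List.contains_eq_mem, hm, hp]
        rw [hc]
        simp only [if_true]
        rw [ih (acc ++ [x])]
        simp only [List.filter_cons, List.filter_filter, List.append_assoc]
        have : (!acc.contains x) = true := by simp [List.contains_eq_mem, hm]
        simp only [this, if_true, List.singleton_append]
        congr 1
        congr 1
        apply List.filter_congr
        intro y _
        by_cases hyx : y = x
        · subst hyx; simp
        · by_cases hy : y ∈ acc <;>
            simp [List.contains_eq_mem, hy, hyx, Ne.symm hyx]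
    · rw [List.filter_cons_of_neg hp]
      have hc : (p x && !(acc.contains x)) = false := by simp [hp]
      rw [hc]
      simp only [Bool.false_eq_true, if_false]
      exact ih acc

-- A's second loop: same shape without the p test
theorem loopB (l : List String) : ∀ (acc : List String),
    l.foldl (fun acc g => if !(acc.contains g) then acc ++ [g] else acc) acc
      = acc ++ (PySem.List.dedup l).filter (fun g => !acc.contains g) := by
  intro acc
  have h := loopA (fun _ => true) l acc
  simp only [Bool.true_and, List.filter_true] at h
  exact h

-- the rank dict B builds answers get? with the first enumerate index
theorem rank_loop (l : List String) : ∀ (s : Int) (d : PySem.Dict String Int) (g : String),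
    ((PySem.List.enumerate l s).foldl (fun rank ig => PySem.Dict.setdefault rank ig.2 ig.1) d).get? g
      = match d.get? g with
        | some v => some v
        | none => (fidx? g l).map (fun k => s + (k : Int)) := by
  induction l with
  | nil => intro s d g; simp [PySem.List.enumerate, fidx?]; cases d.get? g <;> simp
  | cons x t ih =>
    intro s d g
    have he : PySem.List.enumerate (x :: t) s = (s, x) :: PySem.List.enumerate t (s + 1) := by
      simp [PySem.List.enumerate]
    rw [he]
    simp only [List.foldl_cons]
    rw [ih (s + 1) (d.setdefault x s) g]
    by_cases hgx : g = x
    · subst hgx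
      rw [PySem.Dict.get?_setdefault_self]
      cases hd : d.get? g with
      | some v => simp
      | none => simp [fidx?]
    · rw [PySem.Dict.get?_setdefault_of_ne d s hgx]
      cases hd : d.get? g with
      | some v => simp
      | none =>
        have : (x == g) = false := by
          simp only [beq_eq_false_iff_ne, ne_eq]
          exact fun h => hgx h.symm
        simp only [fidx?, this, Bool.false_eq_true, if_false]
        cases fidx? g t with
        | none => simp
        | some k => simp; omega

theorem key_eq (priority : List String) (g : String) :
    ((PySem.List.enumerate priority 0).foldl (fun rank ig => PySem.Dict.setdefault rank ig.2 ig.1)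
        (PySem.Dict.empty : PySem.Dict String Int)).getD g (priority.length : Int)
      = keyFn priority g := by
  rw [PySem.Dict.getD_eq_get?_getD, rank_loop priority 0 PySem.Dict.empty g]
  rw [PySem.Dict.get?_empty]
  unfold keyFn
  cases fidx? g priority with
  | none => simp
  | some k => simp

-- dedup lists first occurrences in order: keyFn over its own list is strictly increasing
theorem keyFn_cons_self (x : String) (t : List String) : keyFn (x :: t) x = 0 := by
  simp [keyFn, fidx?]

theorem keyFn_cons_of_ne_mem (x y : String) (t : List String) (hyx : y ≠ x) (hy : y ∈ t) :
    keyFn (x :: t) y = keyFn t y + 1 := by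
  obtain ⟨k, hk⟩ : ∃ k, fidx? y t = some k := by
    cases h : fidx? y t with
    | none => exact absurd ((fidx?_eq_none_iff y t).1 h) (by simp [hy])
    | some k => exact ⟨k, rfl⟩
  have hxy : (x == y) = false := by
    simp only [beq_eq_false_iff_ne, ne_eq]
    exact fun h => hyx h.symm
  simp [keyFn, fidx?, hxy, hk]

theorem keyFn_nonneg (l : List String) (g : String) : 0 ≤ keyFn l g := by
  unfold keyFn
  cases fidx? g l <;> simp

theorem dedup_pairwise_key (l : List String) :
    (PySem.List.dedup l).Pairwise (fun a b => keyFn l a < keyFn l b) := by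
  induction l with
  | nil => exact List.Pairwise.nil
  | cons x t ih =>
    rw [dedup_cons]
    constructor
    · intro b hb
      have hbm : b ∈ t := (PySem.List.mem_dedup t b).1 (List.mem_of_mem_filter hb)
      have hbx : b ≠ x := by
        have := List.of_mem_filter hb
        simp only [Bool.not_eq_eq_eq_not, Bool.not_true, beq_eq_false_iff_ne, ne_eq] at this
        exact fun h => this h.symm
      rw [keyFn_cons_self, keyFn_cons_of_ne_mem x b t hbx hbm]
      have := keyFn_nonneg t b
      omega
    · refine List.Pairwise.imp_of_mem ?_ (ih.filter (fun y => !(x == y)))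
      intro a b ha hb hab
      have ham : a ∈ t := (PySem.List.mem_dedup t a).1 (List.mem_of_mem_filter ha)
      have hbm : b ∈ t := (PySem.List.mem_dedup t b).1 (List.mem_of_mem_filter hb)
      have hax : a ≠ x := by
        have := List.of_mem_filter ha
        simp only [Bool.not_eq_eq_eq_not, Bool.not_true, beq_eq_false_iff_ne, ne_eq] at this
        exact fun h => this h.symm
      have hbx : b ≠ x := by
        have := List.of_mem_filter hb
        simp only [Bool.not_eq_eq_eq_not, Bool.not_true, beq_eq_false_iff_ne, ne_eq] at this
        exact fun h => this h.symm
      rw [keyFn_cons_of_ne_mem x a t hax ham, keyFn_cons_of_ne_mem x b t hbx hbm]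
      omega

-- inserting an element that every element of r should come after passes r through
theorem insertBy_append_of_hit (before : String → String → Bool) (x : String) :
    ∀ (p r : List String), (∀ y ∈ r, before x y = true) →
    PySem.List.insertBy before x (p ++ r) = PySem.List.insertBy before x p ++ r := by
  intro p r hr
  induction p with
  | nil =>
    cases r with
    | nil => rfl
    | cons y t =>
      have := hr y (by simp)
      simp [PySem.List.insertBy, this]
  | cons a p ih =>
    by_cases hb : before x a
    · simp [PySem.List.insertBy, hb]
    · simp only [List.cons_append, PySem.List.insertBy, hb, Bool.false_eq_true, if_false]
      rw [ih]

-- stable sort with all keys ≤ n splits into the sorted low part and the untouched key-n part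
theorem sorted_split (key : String → Int) (n : Int) (xs : List String)
    (h : ∀ x ∈ xs, key x ≤ n) :
    PySem.List.sorted xs key
      = PySem.List.sorted (xs.filter (fun x => decide (key x < n))) key
          ++ xs.filter (fun x => key x == n) := by
  induction xs using List.reverseRecOn with
  | nil => rfl
  | append_singleton ys x ih =>
    have hys : ∀ y ∈ ys, key y ≤ n := fun y hy => h y (by simp [hy])
    have hx : key x ≤ n := h x (by simp)
    have hstep : ∀ (zs : List String),
        PySem.List.sorted (zs ++ [x]) key
          = PySem.List.insertBy (fun a b => decide (key a < key b)) x (PySem.List.sorted zs key) := by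
      intro zs
      rw [PySem.List.sorted_eq_foldl_insertBy, PySem.List.sorted_eq_foldl_insertBy,
        List.foldl_append, List.foldl_cons, List.foldl_nil]
    rcases lt_or_eq_of_le hx with hlt | heq
    · have hxlt : decide (key x < n) = true := by simp [hlt]
      have hxn : (key x == n) = false := by simp; omega
      rw [hstep, ih hys]
      rw [insertBy_append_of_hit _ _ _ _ ?hit]
      case hit =>
        intro y hy
        have := List.of_mem_filter hy
        have hyn : key y = n := by simpa using this
        simp [hyn, hlt]
      rw [List.filter_append, List.filter_append]
      simp only [List.filter_cons, List.filter_nil, hxlt, hxn, if_true,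
        Bool.false_eq_true, if_false, List.append_nil]
      rw [hstep (ys.filter (fun x => decide (key x < n)))]
    · have hxlt : decide (key x < n) = false := by simp; omega
      have hxn : (key x == n) = true := by simp [heq]
      rw [hstep, ih hys, PySem.List.insertBy_of_forall_not_before]
      · rw [List.filter_append, List.filter_append]
        simp only [List.filter_cons, List.filter_nil, hxlt, hxn, if_true,
          Bool.false_eq_true, if_false, List.append_nil, List.append_assoc]
      · intro y hy
        rcases List.mem_append.1 hy with hy | hy
        · have hym : y ∈ ys.filter (fun x => decide (key x < n)) :=
            (PySem.List.mem_sorted _ _ _ y).1 hy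
          have := List.of_mem_filter hym
          have : key y < n := by simpa using this
          simp; omega
        · have := List.of_mem_filter hy
          have hyn : key y = n := by simpa using this
          simp [hyn]; omega

-- ===== VERDICT (by name: the statement is the Claim_ definition above) =====
theorem keyFn_mem_iff (priority : List String) (g : String) :
    (keyFn priority g < (priority.length : Int) ↔ g ∈ priority)
      ∧ (keyFn priority g = (priority.length : Int) ↔ g ∉ priority) := by
  unfold keyFn
  cases h : fidx? g priority with
  | none =>
    have : g ∉ priority := (fidx?_eq_none_iff g priority).1 h
    simp [this]
  | some k =>
    have hk := fidx?_lt_length g priority k h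
    have hm : g ∈ priority := by
      by_contra hn
      rw [(fidx?_eq_none_iff g priority).2 hn] at h
      exact absurd h (by simp)
    simp only [hm, iff_true, not_true_eq_false, iff_false]
    constructor
    · exact_mod_cast hk
    · intro he; omega

theorem prioritize_groups_spec : Claim_equal_prioritize_groups := by
  unfold Claim_equal_prioritize_groups
  intro groups priority _
  unfold Spec_prioritize_groups prioritize_groups prioritize_groups_alt
  simp only []
  -- A's two loops in closed form
  rw [loopA (fun g => groups.contains g) priority [], loopB groups]
  simp only [List.nil_append, List.contains_nil, Bool.not_false, List.filter_true]
  set P0 := PySem.List.dedup (priority.filter (fun g => groups.contains g)) with hP0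
  -- B's key in closed form
  have hkey : (fun g => ((PySem.List.enumerate priority 0).foldl
      (fun rank ig => PySem.Dict.setdefault rank ig.2 ig.1)
      (PySem.Dict.empty : PySem.Dict String Int)).getD g (priority.length : Int)) = keyFn priority :=
    funext (key_eq priority)
  rw [hkey]
  set U := PySem.List.dedup groups with hU
  have hle : ∀ x ∈ U, keyFn priority x ≤ (priority.length : Int) := by
    intro x _
    unfold keyFn
    cases h : fidx? x priority with
    | none => simp
    | some k =>
      have := fidx?_lt_length x priority k h
      simp
      omega
  rw [sorted_split (keyFn priority) (priority.length : Int) U hle]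
  -- identify the low part
  have hlowf : U.filter (fun x => decide (keyFn priority x < (priority.length : Int)))
      = U.filter (fun g => priority.contains g) := by
    apply List.filter_congr
    intro x _
    have := (keyFn_mem_iff priority x).1
    by_cases hm : x ∈ priority <;> simp [List.contains_eq_mem, hm, this]
  have hlow : PySem.List.sorted (U.filter (fun x => decide (keyFn priority x < (priority.length : Int))))
      (keyFn priority) = P0 := by
    rw [hlowf]
    apply PySem.List.sorted_eq_of_perm_of_pairwise_lt
    · rw [List.perm_ext_iff_of_nodup]
      · intro g
        rw [hP0, hU]
        simp [List.mem_filter, List.contains_eq_mem, and_comm]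
      · rw [hP0]; exact PySem.List.nodup_dedup _
      · rw [hU]; exact (PySem.List.nodup_dedup groups).filter _
    · rw [hP0, dedup_filter]
      exact (dedup_pairwise_key priority).filter _
  rw [hlow]
  -- identify the high part
  congr 1
  apply List.filter_congr
  intro g hg
  have hgg : g ∈ groups := by
    rw [hU] at hg
    exact (PySem.List.mem_dedup groups g).1 hg
  have hPmem : g ∈ P0 ↔ g ∈ priority := by
    rw [hP0]
    simp [List.mem_filter, List.contains_eq_mem, hgg]
  have := (keyFn_mem_iff priority g).2
  by_cases hm : g ∈ priority <;>
    simp [List.contains_eq_mem, hPmem, hm, this]
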